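-- pv_equiv track=rewrite | github.com/interactiveaudiolab/WUT | scripts/clustering_test.py | remove_vals
-- ===== SOURCE A (Python) =====
-- def remove_vals(bins, vals_to_remove):
--     for idx, val in enumerate(vals_to_remove):
--         if not val:  # remove all correct values
--             found = False
--             for i in bins:
--                 if found:
--                     break
--                 for j in i:
--                     if idx in j:
--                         j.remove(idx)
--                         found = True
--                         break
--     return bins
-- ===== SOURCE B (Python) =====
-- def remove_vals(bins, vals_to_remove):
--     # One pass over the nested structure with a pending set of indices to remove.
--     pending = {idx for idx, val in enumerate(vals_to_remove) if not val}
--     for i in bins: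
--         for j in i:
--             hit = pending.intersection(j)
--             if hit:
--                 skip = set(hit)
--                 kept = []
--                 for x in j:
--                     if x in skip:
--                         skip.discard(x)
--                     else:
--                         kept.append(x)
--                 j[:] = kept
--                 pending -= hit
--     return bins
-- ===== Notes on version B (the rewrite author's own statement) =====
-- stated objective: faster
-- what changed: Instead of rescanning the whole nested structure once per falsy flag index, B builds the set of indices to remove once and makes a single pass over the bins, removing in each sublist the first occurrence of every still-pending index found there; removals of distinct indices commute, so the result is identical.
import Mathlib
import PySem

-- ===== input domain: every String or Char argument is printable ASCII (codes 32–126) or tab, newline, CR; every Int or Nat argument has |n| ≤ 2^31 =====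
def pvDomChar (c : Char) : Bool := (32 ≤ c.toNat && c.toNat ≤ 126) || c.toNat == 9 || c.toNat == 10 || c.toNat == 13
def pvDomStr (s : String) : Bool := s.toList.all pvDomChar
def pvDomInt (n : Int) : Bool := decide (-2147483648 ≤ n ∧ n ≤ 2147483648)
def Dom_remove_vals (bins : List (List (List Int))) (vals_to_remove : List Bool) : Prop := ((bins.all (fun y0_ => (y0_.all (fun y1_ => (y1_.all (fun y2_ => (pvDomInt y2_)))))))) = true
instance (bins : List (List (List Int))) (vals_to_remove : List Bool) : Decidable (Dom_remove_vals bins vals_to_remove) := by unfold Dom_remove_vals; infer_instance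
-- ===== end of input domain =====

-- B removes each falsy-flag index in ONE pass over the bins with a pending set, instead of one full
-- rescan per index (objective: faster; A mutates bins in place, B performs the same in-place
-- mutation in Python; the equivalence proved here is about the returned value).

-- ===== PORT A =====
-- inner two loops of A for one idx over one group i: remove first occurrence of idx from the
-- first sublist j containing it; returns (new group, found)
def pvRfg (idx : Int) : List (List Int) → List (List Int) × Bool
  | [] => ([], false)
  | j :: js =>
    if idx ∈ j then ((j.erase idx) :: js, true)
    else
      let r := pvRfg idx js
      (j :: r.1, r.2)

-- the 'for i in bins: if found: break' loop of A for one idx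
def pvROnce (idx : Int) : List (List (List Int)) → List (List (List Int))
  | [] => []
  | i :: rest =>
    let r := pvRfg idx i
    if r.2 then r.1 :: rest else r.1 :: pvROnce idx rest

def remove_vals (bins : List (List (List Int))) (vals_to_remove : List Bool) : List (List (List Int)) :=
  (PySem.List.enumerate vals_to_remove).foldl
    (fun acc p => if !p.2 then pvROnce p.1 acc else acc) bins

-- ===== PORT B =====
-- the 'for x in j' rebuild loop of B: drop the first occurrence of each element of skip
def pvRebuild (skip : PySem.Set Int) : List Int → List Int
  | [] => []
  | x :: xs =>
    if PySem.Set.contains skip x then pvRebuild (PySem.Set.discard skip x) xs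
    else x :: pvRebuild skip xs

-- the 'for j in i' loop of B over one group, threading the pending set
def pvPassGroup (pending : PySem.Set Int) : List (List Int) → List (List Int) × PySem.Set Int
  | [] => ([], pending)
  | j :: js =>
    let hit := PySem.Set.inter pending j
    if hit.isEmpty then
      let r := pvPassGroup pending js
      (j :: r.1, r.2)
    else
      let r := pvPassGroup (PySem.Set.diff pending hit) js
      (pvRebuild hit j :: r.1, r.2)

-- the 'for i in bins' loop of B
def pvPassBins (pending : PySem.Set Int) : List (List (List Int)) → List (List (List Int))
  | [] => []
  | i :: rest =>
    let r := pvPassGroup pending i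
    r.1 :: pvPassBins r.2 rest

def remove_vals_alt (bins : List (List (List Int))) (vals_to_remove : List Bool) : List (List (List Int)) :=
  let pending := PySem.Set.ofList
    ((PySem.List.enumerate vals_to_remove).filterMap (fun p => if p.2 then none else some p.1))
  pvPassBins pending bins

-- ===== PRECONDITION & SPEC =====
def Spec_remove_vals (bins : List (List (List Int))) (vals_to_remove : List Bool) (out : List (List (List Int))) : Prop := out = remove_vals_alt bins vals_to_remove
instance (bins : List (List (List Int))) (vals_to_remove : List Bool) (out : List (List (List Int))) : Decidable (Spec_remove_vals bins vals_to_remove out) := by unfold Spec_remove_vals; infer_instance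

-- ===== CLAIM (what is proved, stated in full; the proofs are below) =====
def Claim_equal_remove_vals : Prop := ∀ (bins : List (List (List Int))) (vals_to_remove : List Bool), Dom_remove_vals bins vals_to_remove → Spec_remove_vals bins vals_to_remove (remove_vals bins vals_to_remove)

-- ===== LEMMAS AND PROOFS =====

theorem pvRebuild_nil_skip (j : List Int) : pvRebuild [] j = j := by
  induction j with
  | nil => rfl
  | cons x xs ih => simp [pvRebuild, PySem.Set.contains, ih]

-- removing a fresh index a via the skip set = removing it from the list first
theorem pvRebuild_cons_erase (a : Int) (skip : List Int) (j : List Int) (ha : a ∉ skip) :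
    pvRebuild (a :: skip) j = pvRebuild skip (j.erase a) := by
  induction j generalizing skip with
  | nil => simp [pvRebuild]
  | cons x xs ih =>
    by_cases hxa : x = a
    · subst hxa
      have hd : PySem.Set.discard (x :: skip) x = skip := by
        simp only [PySem.Set.discard, List.filter_cons]
        simp only [beq_self_eq_true, Bool.not_true, if_neg (by simp : ¬ (false = true))]
        exact List.filter_eq_self.mpr (fun y hy => by
          simp only [Bool.not_eq_true', beq_eq_false_iff_ne, ne_eq]
          exact fun h => ha (h ▸ hy))
      simp [pvRebuild, PySem.Set.contains, hd, List.erase_cons_head]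
    · have hx' : (x == a) = false := by simpa using hxa
      rw [List.erase_cons_tail (by simpa using hxa)]
      by_cases hxs : x ∈ skip
      · have hd : PySem.Set.discard (a :: skip) x = a :: PySem.Set.discard skip x := by
          simp only [PySem.Set.discard, List.filter_cons]
          have : (a == x) = false := by simpa using Ne.symm hxa
          simp [this]
        have ha' : a ∉ PySem.Set.discard skip x := by
          simp only [PySem.Set.discard, List.mem_filter]
          exact fun h => ha h.1
        have hc : PySem.Set.contains (a :: skip) x = true := by
          simp [PySem.Set.contains, hxs]
        have hc2 : PySem.Set.contains skip x = true := by
          simp [PySem.Set.contains, hxs]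
        simp only [pvRebuild, hc, hc2, hd, ih _ ha']
        simp
      · have hc : PySem.Set.contains (a :: skip) x = false := by
          simp [PySem.Set.contains, hxa, hxs]
        have hc2 : PySem.Set.contains skip x = false := by
          simp [PySem.Set.contains, hxs]
        simp only [pvRebuild, hc, hc2, ih _ ha]
        simp

theorem pvRfg_not_found (a : Int) (i : List (List Int)) (h : (pvRfg a i).2 = false) :
    (pvRfg a i).1 = i := by
  induction i with
  | nil => rfl
  | cons j js ih =>
    by_cases hm : a ∈ j
    · simp [pvRfg, hm] at h
    · simp only [pvRfg, if_neg hm] at h ⊢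
      simp [ih h]

theorem pvPassGroup_pending_subset (a : Int) (i : List (List Int)) (s : List Int)
    (h : a ∈ (pvPassGroup s i).2) : a ∈ s := by
  induction i generalizing s with
  | nil => simpa [pvPassGroup] using h
  | cons j js ih =>
    simp only [pvPassGroup] at h
    split at h
    · exact ih _ h
    · have := ih _ h
      simp only [PySem.Set.diff, List.mem_filter] at this
      exact this.1

theorem pvPassGroup_step (p : PySem.Set Int) (j : List Int) (js : List (List Int)) :
    pvPassGroup p (j :: js) =
      if (PySem.Set.inter p j).isEmpty then
        (j :: (pvPassGroup p js).1, (pvPassGroup p js).2)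
      else
        (pvRebuild (PySem.Set.inter p j) j ::
            (pvPassGroup (PySem.Set.diff p (PySem.Set.inter p j)) js).1,
          (pvPassGroup (PySem.Set.diff p (PySem.Set.inter p j)) js).2) := by
  simp only [pvPassGroup]

theorem pvInter_cons_mem {a : Int} {j : List Int} (s : List Int) (hm : a ∈ j) :
    PySem.Set.inter (a :: s) j = a :: PySem.Set.inter s j := by
  simp only [PySem.Set.inter, PySem.Set.contains, List.filter_cons]
  simp [hm]

theorem pvInter_cons_not_mem {a : Int} {j : List Int} (s : List Int) (hm : a ∉ j) :
    PySem.Set.inter (a :: s) j = PySem.Set.inter s j := by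
  simp only [PySem.Set.inter, PySem.Set.contains, List.filter_cons]
  simp [hm]

theorem pvInter_subset {x : Int} {s j : List Int} (h : x ∈ PySem.Set.inter s j) : x ∈ s :=
  (List.mem_filter.mp h).1

theorem pvDiff_nil (s : List Int) : PySem.Set.diff s [] = s := by
  simp [PySem.Set.diff, PySem.Set.contains]

theorem pvDiff_cons_self {a : Int} (s t : List Int) (ht : a ∈ t) (_ha : a ∉ s) :
    PySem.Set.diff (a :: s) t = PySem.Set.diff s t := by
  simp only [PySem.Set.diff, PySem.Set.contains, List.filter_cons]
  simp [ht]

theorem pvDiff_cons_not_mem {a : Int} (s t : List Int) (ht : a ∉ t) :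
    PySem.Set.diff (a :: s) t = a :: PySem.Set.diff s t := by
  simp only [PySem.Set.diff, PySem.Set.contains, List.filter_cons]
  simp [ht]

theorem pvDiff_absorb {a : Int} (s t : List Int) (ha : a ∉ s) :
    PySem.Set.diff s (a :: t) = PySem.Set.diff s t := by
  apply List.filter_congr
  intro x hx
  have hxa : ¬ x = a := fun h => ha (h ▸ hx)
  simp [PySem.Set.contains, hxa]

theorem pvDiff_subset {x : Int} {s t : List Int} (h : x ∈ PySem.Set.diff s t) : x ∈ s :=
  (List.mem_filter.mp h).1

-- core commutation at group level
theorem pvPassGroup_cons (a : Int) (i : List (List Int)) (s : List Int) (ha : a ∉ s) :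
    pvPassGroup (a :: s) i =
      if (pvRfg a i).2 then pvPassGroup s (pvRfg a i).1
      else ((pvPassGroup s i).1, a :: (pvPassGroup s i).2) := by
  induction i generalizing s with
  | nil => simp [pvPassGroup, pvRfg]
  | cons j js ih =>
    have hsub : ∀ x ∈ s, x ≠ a := fun x hx h => ha (h ▸ hx)
    have hansub : a ∉ PySem.Set.inter s j := fun h => ha (pvInter_subset h)
    by_cases hm : a ∈ j
    · -- a is removed from this very sublist
      rw [show pvRfg a (j :: js) = ((j.erase a) :: js, true) from by simp [pvRfg, hm]]
      rw [if_pos rfl]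
      have h4 : PySem.Set.inter s (j.erase a) = PySem.Set.inter s j := by
        apply List.filter_congr
        intro x hx
        have : x ∈ j.erase a ↔ x ∈ j := List.mem_erase_of_ne (hsub x hx)
        simp [PySem.Set.contains, this]
      rw [pvPassGroup_step, pvPassGroup_step, pvInter_cons_mem s hm, h4,
        pvDiff_cons_self s _ (List.mem_cons_self) ha, pvDiff_absorb s _ ha,
        pvRebuild_cons_erase a _ j hansub]
      by_cases he : (PySem.Set.inter s j).isEmpty
      · rw [List.isEmpty_iff] at he
        simp [he, pvDiff_nil, pvRebuild_nil_skip]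
      · simp [he]
    · -- a is not in this sublist
      rw [show pvRfg a (j :: js) = (j :: (pvRfg a js).1, (pvRfg a js).2) from by
        simp [pvRfg, hm]]
      by_cases he : (PySem.Set.inter s j).isEmpty
      · rw [pvPassGroup_step, pvInter_cons_not_mem s hm, if_pos he, ih s ha]
        by_cases ht : (pvRfg a js).2
        · rw [if_pos ht, if_pos ht, pvPassGroup_step, if_pos he]
        · rw [if_neg ht, if_neg ht, pvPassGroup_step, if_pos he]
      · have ha'' : a ∉ PySem.Set.diff s (PySem.Set.inter s j) := fun h => ha (pvDiff_subset h)
        rw [pvPassGroup_step, pvInter_cons_not_mem s hm, if_neg he,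
          pvDiff_cons_not_mem s _ hansub, ih _ ha'']
        by_cases ht : (pvRfg a js).2
        · rw [if_pos ht, if_pos ht, pvPassGroup_step, if_neg he]
        · rw [if_neg ht, if_neg ht, pvPassGroup_step, if_neg he]

-- core commutation at bins level
theorem pvPassBins_cons (a : Int) (bins : List (List (List Int))) (s : List Int) (ha : a ∉ s) :
    pvPassBins (a :: s) bins = pvPassBins s (pvROnce a bins) := by
  induction bins generalizing s with
  | nil => simp [pvPassBins, pvROnce]
  | cons i rest ih =>
    have h := pvPassGroup_cons a i s ha
    by_cases hf : (pvRfg a i).2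
    · rw [if_pos hf] at h
      rw [show pvROnce a (i :: rest) = (pvRfg a i).1 :: rest from by
        simp only [pvROnce]; rw [if_pos hf]]
      simp only [pvPassBins, h]
    · rw [if_neg hf] at h
      rw [show pvROnce a (i :: rest) = i :: pvROnce a rest from by
        simp only [pvROnce]
        rw [if_neg hf, pvRfg_not_found a i (Bool.not_eq_true _ ▸ hf)]]
      have ha2 : a ∉ (pvPassGroup s i).2 := fun hx => ha (pvPassGroup_pending_subset a i s hx)
      simp only [pvPassBins, h, ih _ ha2]

theorem pvPassGroup_nil_pending (i : List (List Int)) : pvPassGroup [] i = (i, []) := by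
  induction i with
  | nil => rfl
  | cons j js ih => simp [pvPassGroup, PySem.Set.inter, ih]

theorem pvPassBins_nil_pending (bins : List (List (List Int))) : pvPassBins [] bins = bins := by
  induction bins with
  | nil => rfl
  | cons i rest ih => simp [pvPassBins, pvPassGroup_nil_pending, ih]

-- A's fold of one-at-a-time removals = B's single pass, for a duplicate-free index list
theorem pvFoldl_eq_passBins (L : List Int) (bins : List (List (List Int))) (hL : L.Nodup) :
    L.foldl (fun b i => pvROnce i b) bins = pvPassBins L bins := by
  induction L generalizing bins with
  | nil => simp [List.foldl, pvPassBins_nil_pending]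
  | cons a L ih =>
    simp only [List.foldl]
    rw [ih _ (List.nodup_cons.mp hL).2, ← pvPassBins_cons a bins L (List.nodup_cons.mp hL).1]

theorem pvFoldl_enum_eq (l : List (Int × Bool)) (acc : List (List (List Int))) :
    l.foldl (fun acc p => if !p.2 then pvROnce p.1 acc else acc) acc =
      (l.filterMap (fun p => if p.2 then none else some p.1)).foldl
        (fun b i => pvROnce i b) acc := by
  induction l generalizing acc with
  | nil => rfl
  | cons p l ih =>
    cases p with
    | mk idx v =>
      cases v <;> simpa using ih _

theorem pvL_nodup (vals : List Bool) :
    ((PySem.List.enumerate vals).filterMap (fun p => if p.2 then none else some p.1)).Nodup := by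
  have h := PySem.List.pairwise_lt_enumerate vals 0
  have : List.Pairwise (fun a b : Int => a < b)
      ((PySem.List.enumerate vals).filterMap (fun p => if p.2 then none else some p.1)) := by
    rw [List.pairwise_filterMap]
    refine h.imp ?_
    intro p q hpq b hb b' hb'
    have hb1 : b = p.1 := by by_cases hc : p.2 = true <;> simp [hc] at hb <;> omega
    have hb2 : b' = q.1 := by by_cases hc : q.2 = true <;> simp [hc] at hb' <;> omega
    omega
  exact this.imp (fun h => ne_of_lt h)

-- ===== VERDICT (by name: the statement is the Claim_ definition above) =====
theorem remove_vals_spec : Claim_equal_remove_vals := by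
  intro bins vals _
  unfold Spec_remove_vals remove_vals remove_vals_alt
  rw [pvFoldl_enum_eq, PySem.Set.ofList_eq_self_of_nodup _ (pvL_nodup vals),
    pvFoldl_eq_passBins _ _ (pvL_nodup vals)]
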